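-- pv_equiv track=rewrite | github.com/1bcollins/fdc | Droid/Archive/droidController20250907.py | determine_ladder_case
-- ===== SOURCE A (Python) =====
-- from typing import List
--
-- LADDER_CASES = {
-- 	"ORIGINAL": "original",
-- 	"EXT_UP": "extended_up",
-- 	"EXT_DOWN": "extended_down",
-- 	"REBAL_UP": "rebalance_up",
-- 	"REBAL_DOWN": "rebalance_down"
-- }
--
-- def determine_ladder_case(ladder: List[int], ladderOffset: int) -> str:
-- 	if all(x == 0 for x in ladder):
-- 		return LADDER_CASES["ORIGINAL"]
--
-- 	expected_up = [i * ladderOffset for i in range(len(ladder))]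
-- 	expected_down = [i * -ladderOffset for i in range(len(ladder))]
--
-- 	if ladder == expected_up:
-- 		return LADDER_CASES["EXT_UP"]
-- 	elif ladder == expected_down:
-- 		return LADDER_CASES["EXT_DOWN"]
-- 	else:
-- 		return "unknown"
-- ===== SOURCE B (Python) =====
-- def determine_ladder_case(ladder, ladderOffset):
--     if set(ladder) <= {0}:
--         return "original"
--     diffs = {b - a for a, b in zip(ladder, ladder[1:])}
--     if ladder[0] == 0 and diffs <= {ladderOffset}:
--         return "extended_up"
--     if ladder[0] == 0 and diffs <= {-ladderOffset}:
--         return "extended_down"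
--     return "unknown"
-- ===== Notes on version B (the rewrite author's own statement) =====
-- stated objective: alternative
-- what changed: B replaces A's construction of the two expected index-multiple lists and list comparisons with an arithmetic-progression test: it compares the SET of consecutive differences (via zip with the shifted list) against {offset}/{-offset} together with a first-element-zero check, and tests the all-zero case as set(ladder) <= {0}.
import Mathlib
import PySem

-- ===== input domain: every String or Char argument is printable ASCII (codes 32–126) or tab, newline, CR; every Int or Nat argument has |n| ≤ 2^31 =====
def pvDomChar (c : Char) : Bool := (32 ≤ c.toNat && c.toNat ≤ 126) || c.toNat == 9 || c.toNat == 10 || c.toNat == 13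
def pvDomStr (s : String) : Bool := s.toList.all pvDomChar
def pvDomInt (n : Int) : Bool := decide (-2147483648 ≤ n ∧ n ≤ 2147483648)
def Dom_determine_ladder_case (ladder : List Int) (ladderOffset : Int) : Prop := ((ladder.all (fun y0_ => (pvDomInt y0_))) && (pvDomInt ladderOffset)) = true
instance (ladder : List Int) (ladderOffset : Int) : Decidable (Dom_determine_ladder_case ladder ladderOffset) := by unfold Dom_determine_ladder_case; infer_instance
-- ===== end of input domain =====

-- B classifies the ladder by its SET of consecutive differences (an arithmetic-progression
-- test: first element 0 and every difference equal to ±offset) instead of A's building the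
-- two expected index-multiple lists and comparing; objective: alternative.

-- ===== PORT A =====
def determine_ladder_case (ladder : List Int) (ladderOffset : Int) : String :=
  if ladder.all (fun x => x == 0) then "original"
  else
    let expected_up := (PySem.List.pyRange 0 (ladder.length : Int) 1).map (fun i => i * ladderOffset)
    let expected_down := (PySem.List.pyRange 0 (ladder.length : Int) 1).map (fun i => i * (-ladderOffset))
    if ladder = expected_up then "extended_up"
    else if ladder = expected_down then "extended_down"
    else "unknown"

-- ===== PORT B =====
def determine_ladder_case_alt (ladder : List Int) (ladderOffset : Int) : String :=
  if PySem.Set.issubset (PySem.Set.ofList ladder) (PySem.Set.ofList [0]) then "original"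
  else
    let diffs := PySem.Set.ofList ((ladder.zip (PySem.List.slice ladder (some 1) none)).map (fun p => p.2 - p.1))
    if PySem.List.pyGet? ladder 0 == some 0 && PySem.Set.issubset diffs (PySem.Set.ofList [ladderOffset]) then "extended_up"
    else if PySem.List.pyGet? ladder 0 == some 0 && PySem.Set.issubset diffs (PySem.Set.ofList [-ladderOffset]) then "extended_down"
    else "unknown"

-- ===== PRECONDITION & SPEC =====
def Spec_determine_ladder_case (ladder : List Int) (ladderOffset : Int) (out : String) : Prop := out = determine_ladder_case_alt ladder ladderOffset
instance (ladder : List Int) (ladderOffset : Int) (out : String) : Decidable (Spec_determine_ladder_case ladder ladderOffset out) := by unfold Spec_determine_ladder_case; infer_instance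

-- ===== CLAIM (what is proved, stated in full; the proofs are below) =====
def Claim_equal_determine_ladder_case : Prop := ∀ (ladder : List Int) (ladderOffset : Int), Dom_determine_ladder_case ladder ladderOffset → Spec_determine_ladder_case ladder ladderOffset (determine_ladder_case ladder ladderOffset)

-- ===== LEMMAS AND PROOFS =====

/-- arithmetic-progression check: xs = c, c+k, c+2k, … -/
def pvAP (k : Int) : Int → List Int → Bool
  | _, [] => true
  | c, x :: xs => (x == c) && pvAP k (c + k) xs

theorem pvAP_iff (k : Int) (xs : List Int) (j : Int) :
    pvAP k (j * k) xs = true ↔ xs = (PySem.List.pyRange j (j + xs.length) 1).map (fun i => i * k) := by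
  induction xs generalizing j with
  | nil => simp [pvAP]
  | cons x xs ih =>
    have h1 : j < j + ((x :: xs).length : Int) := by
      have : (0:Int) < ((x :: xs).length : Int) := by exact_mod_cast Nat.succ_pos xs.length
      omega
    rw [PySem.List.pyRange_one_cons h1]
    simp only [pvAP, Bool.and_eq_true, beq_iff_eq, List.map_cons, List.cons.injEq]
    have h2 : j + ((x :: xs).length : Int) = (j + 1) + (xs.length : Int) := by
      simp; omega
    have h3 : j * k + k = (j + 1) * k := by ring
    rw [h2, h3, ← ih]

theorem pvAP_diffs (k : Int) (x : Int) (rest : List Int) (c : Int) :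
    pvAP k c (x :: rest) =
      ((x == c) && ((x :: rest).zip rest).all (fun p => p.2 - p.1 == k)) := by
  induction rest generalizing x c with
  | nil => simp [pvAP]
  | cons y ys ih =>
    have hdef : pvAP k c (x :: y :: ys) = ((x == c) && pvAP k (c + k) (y :: ys)) := rfl
    rw [hdef, ih y (c + k), List.zip_cons_cons, List.all_cons]
    by_cases hx : x = c
    · subst hx
      have he : (y == x + k) = (y - x == k) := by
        rcases em (y = x + k) with hy | hy
        · subst hy
          simp
        · have hy2 : (y - x == k) = false := by
            simp; omega
          rw [hy2]
          simp [hy]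
      rw [he]
    · have hf : (x == c) = false := by simp [hx]
      rw [hf, Bool.false_and, Bool.false_and]

theorem pvZero_iff (ladder : List Int) :
    PySem.Set.issubset (PySem.Set.ofList ladder) (PySem.Set.ofList [0]) = true ↔
      ladder.all (fun x => x == 0) = true := by
  rw [PySem.Set.issubset_iff]
  simp [PySem.Set.mem_ofList, List.all_eq_true]

theorem pvDiffs_iff (k : Int) (ladder : List Int) :
    PySem.Set.issubset
        (PySem.Set.ofList ((ladder.zip (PySem.List.slice ladder (some 1) none)).map (fun p => p.2 - p.1)))
        (PySem.Set.ofList [k]) = true ↔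
      ((ladder.zip ladder.tail).all (fun p => p.2 - p.1 == k)) = true := by
  rw [PySem.Set.issubset_iff, PySem.List.slice_from_one]
  simp only [PySem.Set.mem_ofList, List.mem_map, List.mem_singleton, List.all_eq_true,
    beq_iff_eq, forall_exists_index, and_imp]
  constructor
  · intro h p hp
    exact h _ p hp rfl
  · rintro h x p hp rfl
    exact h p hp

theorem pvCond_iff (k : Int) (x : Int) (rest : List Int) :
    (x :: rest = (PySem.List.pyRange 0 ((x :: rest).length : Int) 1).map (fun i => i * k)) ↔
      ((PySem.List.pyGet? (x :: rest) 0 == some 0 &&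
        PySem.Set.issubset
          (PySem.Set.ofList (((x :: rest).zip (PySem.List.slice (x :: rest) (some 1) none)).map (fun p => p.2 - p.1)))
          (PySem.Set.ofList [k])) = true) := by
  rw [Bool.and_eq_true, pvDiffs_iff]
  have h0 : (PySem.List.pyGet? (x :: rest) 0 == some 0) = (x == 0) := by
    simp [PySem.List.pyGet?, PySem.List.pyIdx?]
  rw [h0]
  have h := pvAP_iff k (x :: rest) 0
  rw [zero_mul] at h
  simp only [zero_add] at h
  rw [← h, pvAP_diffs]
  simp [List.tail]

-- ===== VERDICT (by name: the statement is the Claim_ definition above) =====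
theorem determine_ladder_case_spec : Claim_equal_determine_ladder_case := by
  intro ladder off _
  unfold Spec_determine_ladder_case determine_ladder_case determine_ladder_case_alt
  by_cases hz : ladder.all (fun x => x == 0) = true
  · rw [if_pos hz, if_pos ((pvZero_iff ladder).mpr hz)]
  · rw [if_neg hz, if_neg (fun h => hz ((pvZero_iff ladder).mp h))]
    cases ladder with
    | nil => exact absurd rfl hz
    | cons x rest =>
      have hu := pvCond_iff off x rest
      have hd := pvCond_iff (-off) x rest
      by_cases h1 : x :: rest = (PySem.List.pyRange 0 ((x :: rest).length : Int) 1).map (fun i => i * off)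
      · rw [if_pos h1, if_pos (hu.mp h1)]
      · rw [if_neg h1, if_neg (fun h => h1 (hu.mpr h))]
        by_cases h2 : x :: rest = (PySem.List.pyRange 0 ((x :: rest).length : Int) 1).map (fun i => i * (-off))
        · rw [if_pos h2, if_pos (hd.mp h2)]
        · rw [if_neg h2, if_neg (fun h => h2 (hd.mpr h))]
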